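-- pv_equiv track=rewrite | github.com/Xoel-Rodriguez-Pereira/Ejercicios-de-codewars | matriz_identidad.py | esMatrizIdentidad
-- ===== SOURCE A (Python) =====
-- def esMatrizIdentidad (matriz):
--
--     CERO = 0
--     for fila in range(len(matriz)):
--
--         if len(matriz[fila]) != len(matriz):
--             return False
--
--         for columna in (range(len(matriz[fila]))):
--
--             if fila == columna and matriz[fila][columna] != 1:
--                 return False
--
--             elif fila != columna and matriz[fila][columna] != CERO:
--                 return False
--
--     return True
-- ===== SOURCE B (Python) =====
-- def esMatrizIdentidad(matriz):
--     n = len(matriz)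
--     expected = [[int(i == j) for j in range(n)] for i in range(n)]
--     return matriz == expected
-- ===== Notes on version B (the rewrite author's own statement) =====
-- stated objective: simpler
-- what changed: Instead of nested index loops with early returns per entry, B builds the expected identity matrix once and returns a single structural equality comparison.
import Mathlib
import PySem

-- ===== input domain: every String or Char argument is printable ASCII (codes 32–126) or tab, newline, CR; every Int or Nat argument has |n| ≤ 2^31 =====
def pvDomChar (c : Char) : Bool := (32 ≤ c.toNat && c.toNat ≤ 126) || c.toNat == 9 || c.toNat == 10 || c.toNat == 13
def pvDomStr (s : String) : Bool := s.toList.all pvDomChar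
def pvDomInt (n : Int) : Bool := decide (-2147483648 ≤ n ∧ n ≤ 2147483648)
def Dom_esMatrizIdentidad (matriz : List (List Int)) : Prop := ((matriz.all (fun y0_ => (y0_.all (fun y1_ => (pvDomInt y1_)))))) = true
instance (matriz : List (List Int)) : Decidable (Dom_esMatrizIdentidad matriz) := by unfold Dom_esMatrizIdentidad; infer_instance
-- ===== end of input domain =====

-- B builds the expected identity matrix once and compares, instead of A's
-- nested index loops with per-entry early returns (objective: simpler).

-- ===== PORT A =====
-- inner loop: 'for columna in range(len(matriz[fila]))' walking the row with its index
def pvAcols : List Int → Nat → Nat → Bool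
  | [], _, _ => true
  | x :: xs, fila, columna =>
    if fila = columna ∧ x ≠ 1 then false
    else if fila ≠ columna ∧ x ≠ 0 then false
    else pvAcols xs fila (columna + 1)

-- outer loop: 'for fila in range(len(matriz))' walking the rows with their index
def pvArows : List (List Int) → Nat → Nat → Bool
  | [], _, _ => true
  | r :: rs, n, fila =>
    if r.length ≠ n then false
    else if pvAcols r fila 0 then pvArows rs n (fila + 1)
    else false

def esMatrizIdentidad (matriz : List (List Int)) : Bool :=
  pvArows matriz matriz.length 0

-- ===== PORT B =====
def esMatrizIdentidad_alt (matriz : List (List Int)) : Bool :=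
  let n := matriz.length
  let expected := (List.range n).map (fun i => (List.range n).map (fun j => if i = j then (1 : Int) else 0))
  decide (matriz = expected)

-- ===== PRECONDITION & SPEC =====
def Spec_esMatrizIdentidad (matriz : List (List Int)) (out : Bool) : Prop := out = esMatrizIdentidad_alt matriz
instance (matriz : List (List Int)) (out : Bool) : Decidable (Spec_esMatrizIdentidad matriz out) := by unfold Spec_esMatrizIdentidad; infer_instance

-- ===== CLAIM (what is proved, stated in full; the proofs are below) =====
def Claim_equal_esMatrizIdentidad : Prop := ∀ (matriz : List (List Int)), Dom_esMatrizIdentidad matriz → Spec_esMatrizIdentidad matriz (esMatrizIdentidad matriz)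

-- ===== LEMMAS AND PROOFS =====

theorem pvAcols_eq (row : List Int) : ∀ (fila columna : Nat),
    pvAcols row fila columna
      = decide (row = (List.range' columna row.length).map (fun j => if fila = j then (1 : Int) else 0)) := by
  induction row with
  | nil => intro fila columna; simp [pvAcols]
  | cons x xs ih =>
    intro fila columna
    simp only [pvAcols, List.length_cons, List.range'_succ, List.map_cons]
    by_cases h : fila = columna
    · by_cases hx : x = 1
      · subst h; simp [hx, ih]
      · simp [h, hx]
    · by_cases hx : x = 0
      · simp [h, hx, ih]
      · simp [h, hx]

set_option maxRecDepth 4000 in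
theorem pvArows_eq (rs : List (List Int)) : ∀ (n fila : Nat),
    pvArows rs n fila
      = decide (rs = (List.range' fila rs.length).map
          (fun i => (List.range n).map (fun j => if i = j then (1 : Int) else 0))) := by
  induction rs with
  | nil => intro n fila; simp [pvArows]
  | cons r tl ih =>
    intro n fila
    simp only [pvArows, List.length_cons, List.range'_succ, List.map_cons]
    by_cases hl : r.length = n
    · rw [if_neg (by simp [hl]), pvAcols_eq, hl, ← List.range_eq_range', ih]
      by_cases hr : r = (List.range n).map (fun j => if fila = j then (1 : Int) else 0)
      · simp [hr]
      · simp [hr]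
    · rw [if_pos (by simp [hl])]
      have : r ≠ (List.range n).map (fun j => if fila = j then (1 : Int) else 0) := by
        intro h; apply hl; rw [h]; simp
      simp [this]

-- ===== VERDICT (by name: the statement is the Claim_ definition above) =====
theorem esMatrizIdentidad_spec : Claim_equal_esMatrizIdentidad := by
  intro matriz _
  show pvArows matriz matriz.length 0
      = decide (matriz = (List.range matriz.length).map
          (fun i => (List.range matriz.length).map (fun j => if i = j then (1 : Int) else 0)))
  rw [pvArows_eq, List.range_eq_range']
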